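-- pv_equiv track=rewrite | github.com/Breakend/AdversarialGain | utils.py | find_num_different_words
-- ===== SOURCE A (Python) =====
-- def find_num_different_words(one, two):
--     one = one.split(" ")
--     two = two.split(" ")
--     maxxlen = max(len(one), len(two))
--     diffs = 0
--     for i in range(maxxlen):
--         if i >= len(one):
--             if two[i]: diffs += 1
--             continue
--         if i >= len(two):
--             if one[i]: diffs += 1
--             continue
--         if one[i] and two[i] and two[i] != one[i]:
--             diffs += 1
--
--     return diffs
-- ===== SOURCE B (Python) =====
-- def find_num_different_words(one, two):
--     xs = one.split(" ")
--     ys = two.split(" ")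
--     m = min(len(xs), len(ys))
--     both = sum(1 for a, b in zip(xs, ys) if a and b)       # overlap pairs with two real words
--     same = sum(1 for a, b in zip(xs, ys) if a and a == b)  # overlap pairs that agree on a real word
--     tail = xs[m:] + ys[m:]                                 # leftover of the longer split
--     extra = len(tail) - tail.count("")                     # its real words
--     return both - same + extra
-- ===== Notes on version B (the rewrite author's own statement) =====
-- stated objective: alternative
-- what changed: A classifies every index of range(max(len,len)) with a three-way region branch and a compound diff test; B never tests 'differ' at all: it assembles the answer by inclusion-exclusion from independent simple counts (both-real pairs minus agreeing pairs, plus len-minus-count('') of the concatenated leftovers).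
import Mathlib
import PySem

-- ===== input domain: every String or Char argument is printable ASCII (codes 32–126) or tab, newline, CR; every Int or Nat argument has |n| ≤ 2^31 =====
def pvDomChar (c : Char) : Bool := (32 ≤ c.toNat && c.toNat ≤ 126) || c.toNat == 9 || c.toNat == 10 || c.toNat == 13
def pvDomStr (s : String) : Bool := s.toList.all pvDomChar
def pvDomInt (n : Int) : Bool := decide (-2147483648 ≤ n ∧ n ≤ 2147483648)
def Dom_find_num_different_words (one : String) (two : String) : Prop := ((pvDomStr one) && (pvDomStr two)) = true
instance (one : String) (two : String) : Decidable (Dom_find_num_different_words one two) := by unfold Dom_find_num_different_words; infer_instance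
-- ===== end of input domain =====

-- B assembles the answer by inclusion-exclusion from simple counts instead of A's per-index three-way branch (same cost, different decomposition).

-- ===== PORT A =====
-- literal transliteration of A: split on " ", loop i over range(max len), branch per region.
-- two[i] / one[i] are ported with pyGetD: in each branch the index is provably in range, so the default is never read.
def find_num_different_words (one : String) (two : String) : Int :=
  let one := (PySem.Str.split? one " ").getD []
  let two := (PySem.Str.split? two " ").getD []
  let maxxlen : Int := ((max one.length two.length : Nat) : Int)
  (PySem.List.pyRange 0 maxxlen).foldl (fun diffs i =>
    if (one.length : Int) ≤ i then
      (if PySem.List.pyGetD two i "" ≠ "" then diffs + 1 else diffs)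
    else if (two.length : Int) ≤ i then
      (if PySem.List.pyGetD one i "" ≠ "" then diffs + 1 else diffs)
    else
      (if PySem.List.pyGetD one i "" ≠ "" ∧ PySem.List.pyGetD two i "" ≠ "" ∧
          PySem.List.pyGetD two i "" ≠ PySem.List.pyGetD one i "" then diffs + 1 else diffs)) 0

-- ===== PORT B =====
-- transliteration of Source B: simple counts (both, same), leftovers concatenated, len - count(""), combined arithmetically.
def find_num_different_words_alt (one : String) (two : String) : Int :=
  let xs := (PySem.Str.split? one " ").getD []
  let ys := (PySem.Str.split? two " ").getD []
  let m : Nat := min xs.length ys.length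
  let both : Int := ((xs.zip ys).countP (fun p => p.1 != "" && p.2 != "") : Nat)
  let same : Int := ((xs.zip ys).countP (fun p => p.1 != "" && p.1 == p.2) : Nat)
  let tail := PySem.List.slice xs (some (m : Int)) none ++ PySem.List.slice ys (some (m : Int)) none
  let extra : Int := (tail.length : Int) - ((tail.count "" : Nat) : Int)
  both - same + extra

-- ===== PRECONDITION & SPEC =====
def Spec_find_num_different_words (one : String) (two : String) (out : Int) : Prop := out = find_num_different_words_alt one two
instance (one : String) (two : String) (out : Int) : Decidable (Spec_find_num_different_words one two out) := by unfold Spec_find_num_different_words; infer_instance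

-- ===== CLAIM (what is proved, stated in full; the proofs are below) =====
def Claim_equal_find_num_different_words : Prop := ∀ (one : String) (two : String), Dom_find_num_different_words one two → Spec_find_num_different_words one two (find_num_different_words one two)

-- ===== LEMMAS AND PROOFS =====

-- A's loop body as a boolean predicate on the index
def pvCondB (L1 L2 : List String) (k : Nat) : Bool :=
  if L1.length ≤ k then L2.getD k "" != ""
  else if L2.length ≤ k then L1.getD k "" != ""
  else (L1.getD k "" != "" && L2.getD k "" != "" && L2.getD k "" != L1.getD k "")

lemma pvCondB_succ (a b : String) (L1 L2 : List String) (k : Nat) :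
    pvCondB (a :: L1) (b :: L2) (k + 1) = pvCondB L1 L2 k := by
  simp [pvCondB]

lemma pvCount_range_getD (q : String → Bool) (L : List String) :
    (List.range L.length).countP (fun j => q (L.getD j "")) = L.countP q := by
  induction L with
  | nil => simp
  | cons x t ih =>
    simp only [List.length_cons, List.range_succ_eq_map, List.countP_cons,
      List.countP_map, List.getD_cons_zero]
    rw [← ih]
    simp [Function.comp_def, Nat.succ_eq_add_one, List.getD_cons_succ, Nat.add_comm]

-- A's count over range(max) = differing real pairs + real words of the longer leftover
lemma pvMain (L1 L2 : List String) :
    (List.range (max L1.length L2.length)).countP (pvCondB L1 L2)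
    = (L1.zip L2).countP (fun p => p.1 != "" && p.2 != "" && p.1 != p.2)
      + (if L2.length < L1.length then L1.drop L2.length else L2.drop L1.length).countP
          (fun w => w != "") := by
  induction L1 generalizing L2 with
  | nil =>
    simp only [List.length_nil, Nat.max_eq_right (Nat.zero_le _), List.zip_nil_left,
      List.countP_nil, Nat.zero_add, if_neg (Nat.not_lt_zero _), List.drop_zero]
    rw [← pvCount_range_getD (fun w => w != "") L2]
    apply List.countP_congr
    intro k _
    simp [pvCondB]
  | cons a t1 ih =>
    cases L2 with
    | nil =>
      simp only [List.length_nil, Nat.max_eq_left (Nat.zero_le _), List.zip_nil_right,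
        List.countP_nil, List.drop_zero, Nat.zero_add, List.length_cons,
        if_pos (Nat.succ_pos _)]
      rw [← pvCount_range_getD (fun w => w != "") (a :: t1)]
      apply List.countP_congr
      intro k hk
      rw [List.mem_range] at hk
      simp [pvCondB, Nat.not_le.mpr hk]
    | cons b t2 =>
      simp only [List.length_cons, Nat.succ_max_succ, List.range_succ_eq_map,
        List.countP_cons, List.countP_map, List.zip_cons_cons, List.drop_succ_cons,
        Nat.add_lt_add_iff_right]
      have hcomp : ((pvCondB (a :: t1) (b :: t2)) ∘ Nat.succ) = pvCondB t1 t2 := by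
        funext k
        exact pvCondB_succ a b t1 t2 k
      rw [hcomp, ih]
      have h0 : pvCondB (a :: t1) (b :: t2) 0 = (a != "" && b != "" && a != b) := by
        simp only [pvCondB, List.length_cons, List.getD_cons_zero]
        rw [if_neg (by omega), if_neg (by omega)]
        by_cases h : a = b <;> simp [h, bne, BEq.comm]
      rw [h0]
      split <;> omega

-- both-real pairs split into differing pairs and agreeing real pairs
lemma pvSplitCount (l : List (String × String)) :
    l.countP (fun p => p.1 != "" && p.2 != "")
    = l.countP (fun p => p.1 != "" && p.2 != "" && p.1 != p.2)
      + l.countP (fun p => p.1 != "" && p.1 == p.2) := by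
  induction l with
  | nil => simp
  | cons p t ih =>
    obtain ⟨a, b⟩ := p
    simp only [List.countP_cons, ih]
    by_cases ha : a = "" <;> by_cases hb : b = "" <;> by_cases hab : a = b <;>
      simp_all [bne] <;> omega

-- length = empties + real words
lemma pvLenCount (l : List String) :
    l.length = l.count "" + l.countP (fun w => w != "") := by
  induction l with
  | nil => simp
  | cons a t ih =>
    by_cases ha : a = "" <;> simp [List.count_cons, List.countP_cons, ha, ih, bne] <;> omega

lemma pvKey (L1 L2 : List String) :
    (PySem.List.pyRange 0 ((max L1.length L2.length : Nat) : Int)).foldl (fun diffs i =>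
      if (L1.length : Int) ≤ i then
        (if PySem.List.pyGetD L2 i "" ≠ "" then diffs + 1 else diffs)
      else if (L2.length : Int) ≤ i then
        (if PySem.List.pyGetD L1 i "" ≠ "" then diffs + 1 else diffs)
      else
        (if PySem.List.pyGetD L1 i "" ≠ "" ∧ PySem.List.pyGetD L2 i "" ≠ "" ∧
            PySem.List.pyGetD L2 i "" ≠ PySem.List.pyGetD L1 i "" then diffs + 1 else diffs)) 0
    = (((L1.zip L2).countP (fun p => p.1 != "" && p.2 != "") : Nat) : Int)
      - (((L1.zip L2).countP (fun p => p.1 != "" && p.1 == p.2) : Nat) : Int)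
      + (((PySem.List.slice L1 (some ((min L1.length L2.length : Nat) : Int)) none
            ++ PySem.List.slice L2 (some ((min L1.length L2.length : Nat) : Int)) none).length : Int)
         - (((PySem.List.slice L1 (some ((min L1.length L2.length : Nat) : Int)) none
            ++ PySem.List.slice L2 (some ((min L1.length L2.length : Nat) : Int)) none).count "" : Nat) : Int)) := by
  rw [PySem.List.pyRange_zero_natCast, List.foldl_map]
  have hbody : (fun (diffs : Int) (k : Nat) =>
      if (L1.length : Int) ≤ (k : Int) then
        (if PySem.List.pyGetD L2 (k : Int) "" ≠ "" then diffs + 1 else diffs)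
      else if (L2.length : Int) ≤ (k : Int) then
        (if PySem.List.pyGetD L1 (k : Int) "" ≠ "" then diffs + 1 else diffs)
      else
        (if PySem.List.pyGetD L1 (k : Int) "" ≠ "" ∧ PySem.List.pyGetD L2 (k : Int) "" ≠ "" ∧
            PySem.List.pyGetD L2 (k : Int) "" ≠ PySem.List.pyGetD L1 (k : Int) "" then diffs + 1 else diffs))
      = (fun diffs k => if pvCondB L1 L2 k then diffs + 1 else diffs) := by
    funext diffs k
    simp only [PySem.List.pyGetD_natCast, Nat.cast_le, pvCondB]
    split_ifs <;> simp_all [bne]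
  rw [hbody, PySem.List.foldl_if_add_one, pvMain,
    PySem.List.slice_from_natCast, PySem.List.slice_from_natCast]
  have hsplit := pvSplitCount (L1.zip L2)
  rcases Nat.lt_or_ge L2.length L1.length with h | h
  · have hm : min L1.length L2.length = L2.length := Nat.min_eq_right (Nat.le_of_lt h)
    rw [if_pos h, hm]
    simp only [List.drop_length, List.append_nil]
    have hlen := pvLenCount (L1.drop L2.length)
    have hmin : min (L1.length : Int) (L2.length : Int) = (L2.length : Int) := by
      rw [min_eq_right]; exact_mod_cast Nat.le_of_lt h
    push_cast
    omega
  · have hm : min L1.length L2.length = L1.length := Nat.min_eq_left h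
    rw [if_neg (Nat.not_lt.mpr h), hm]
    simp only [List.drop_length, List.nil_append]
    have hlen := pvLenCount (L2.drop L1.length)
    have hmin : min (L1.length : Int) (L2.length : Int) = (L1.length : Int) := by
      rw [min_eq_left]; exact_mod_cast h
    push_cast
    omega

-- ===== VERDICT (by name: the statement is the Claim_ definition above) =====
theorem find_num_different_words_spec : Claim_equal_find_num_different_words := by
  intro one two _
  unfold Spec_find_num_different_words find_num_different_words find_num_different_words_alt
  exact pvKey _ _
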